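-- pv_equiv track=rewrite | github.com/zjs81/barnacle-search | src/code_indexer/indexing/deep_index.py | _match_symbol_for_body
-- ===== SOURCE A (Python) =====
-- from typing import Optional
--
-- def _match_symbol_for_body(raw_symbols: list[dict], symbol_name: str) -> Optional[dict]:
--     def last_segment(value: Optional[str]) -> str:
--         if not value:
--             return ""
--         return value.rsplit(".", 1)[-1]
--
--     def signature_name(value: Optional[str]) -> str:
--         if not value:
--             return ""
--         return value.split("(", 1)[0]
--
--     exact_short = next((s for s in raw_symbols if s["short_name"] == symbol_name), None)
--     if exact_short is not None:
--         return exact_short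
--
--     exact_signature = next((s for s in raw_symbols if s.get("signature") == symbol_name), None)
--     if exact_signature is not None:
--         return exact_signature
--
--     short_tail = next(
--         (s for s in raw_symbols if last_segment(s["short_name"]) == symbol_name),
--         None,
--     )
--     if short_tail is not None:
--         return short_tail
--
--     signature_exact = next(
--         (s for s in raw_symbols if signature_name(s.get("signature")) == symbol_name),
--         None,
--     )
--     if signature_exact is not None:
--         return signature_exact
--
--     signature_tail = next(
--         (s for s in raw_symbols if last_segment(signature_name(s.get("signature"))) == symbol_name),
--         None,
--     )
--     return signature_tail
-- ===== SOURCE B (Python) =====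
-- def _match_symbol_for_body(raw_symbols, symbol_name):
--     def last_segment(value):
--         if not value:
--             return ""
--         return value.rsplit(".", 1)[-1]
--
--     def signature_name(value):
--         if not value:
--             return ""
--         return value.split("(", 1)[0]
--
--     exact_signature = None
--     short_tail = None
--     signature_exact = None
--     signature_tail = None
--     for s in raw_symbols:
--         short = s["short_name"]
--         if short == symbol_name:
--             return s
--         sig = s.get("signature")
--         if exact_signature is None and sig == symbol_name:
--             exact_signature = s
--         if short_tail is None and last_segment(short) == symbol_name:
--             short_tail = s
--         if signature_exact is None and signature_name(sig) == symbol_name: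
--             signature_exact = s
--         if signature_tail is None and last_segment(signature_name(sig)) == symbol_name:
--             signature_tail = s
--     if exact_signature is not None:
--         return exact_signature
--     if short_tail is not None:
--         return short_tail
--     if signature_exact is not None:
--         return signature_exact
--     return signature_tail
-- ===== Notes on version B (the rewrite author's own statement) =====
-- stated objective: alternative
-- what changed: A's five sequential full scans of raw_symbols (one per priority category) are fused into a single pass that records the first hit of each lower-priority category in a slot and early-returns only on an exact short_name match, then returns the first filled slot in priority order.
import Mathlib
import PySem

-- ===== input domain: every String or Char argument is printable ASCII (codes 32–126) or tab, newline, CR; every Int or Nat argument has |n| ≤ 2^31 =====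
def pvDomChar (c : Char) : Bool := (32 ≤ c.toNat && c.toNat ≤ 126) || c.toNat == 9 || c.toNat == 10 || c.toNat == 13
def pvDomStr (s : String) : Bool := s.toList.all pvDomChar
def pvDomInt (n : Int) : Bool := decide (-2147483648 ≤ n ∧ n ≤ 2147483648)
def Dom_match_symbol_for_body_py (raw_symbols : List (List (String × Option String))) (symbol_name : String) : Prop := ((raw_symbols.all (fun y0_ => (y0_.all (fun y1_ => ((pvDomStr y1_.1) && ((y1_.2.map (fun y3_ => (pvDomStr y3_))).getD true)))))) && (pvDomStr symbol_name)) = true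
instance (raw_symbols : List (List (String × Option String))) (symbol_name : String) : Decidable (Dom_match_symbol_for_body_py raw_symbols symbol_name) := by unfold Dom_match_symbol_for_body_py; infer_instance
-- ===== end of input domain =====

-- B fuses A's five sequential scans into ONE pass that records the first hit of each
-- lower-priority category in a slot and early-returns only on an exact short_name hit
-- (objective: alternative/constant-factor — one traversal instead of up to five).

-- shared helpers (both Pythons define the same last_segment / signature_name)

-- dict lookup, first match (Python dict modelled as assoc list)
def dGet (s : List (String × Option String)) (k : String) : Option (Option String) :=
  (s.find? (fun p => p.1 == k)).map (fun p => p.2)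

-- last_segment: "" for None/"", else value.rsplit(".", 1)[-1]
def lastSegment (v : Option String) : String :=
  match v with
  | none => ""
  | some s =>
    if s = "" then ""
    else String.ofList ((s.toList.reverse.takeWhile (fun c => c ≠ '.')).reverse)

-- signature_name: "" for None/"", else value.split("(", 1)[0]
def signatureName (v : Option String) : String :=
  match v with
  | none => ""
  | some s =>
    if s = "" then ""
    else String.ofList (s.toList.takeWhile (fun c => c ≠ '('))

-- ===== PORT A ===== (five sequential next(...) scans, each returned if non-None)
def match_symbol_for_body_py (raw_symbols : List (List (String × Option String))) (symbol_name : String) : Option (List (String × Option String)) :=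
  match raw_symbols.find? (fun s => dGet s "short_name" == some (some symbol_name)) with
  | some s => some s
  | none =>
    match raw_symbols.find? (fun s => (dGet s "signature").join == some symbol_name) with
    | some s => some s
    | none =>
      match raw_symbols.find? (fun s => lastSegment ((dGet s "short_name").join) == symbol_name) with
      | some s => some s
      | none =>
        match raw_symbols.find? (fun s => signatureName ((dGet s "signature").join) == symbol_name) with
        | some s => some s
        | none => raw_symbols.find? (fun s => lastSegment (some (signatureName ((dGet s "signature").join))) == symbol_name)

-- ===== PORT B ===== (single pass, four first-hit slots, early return on exact)
-- the post-loop if-chain of Source B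
def pick4 (a b c d : Option (List (String × Option String))) : Option (List (String × Option String)) :=
  match a with
  | some r => some r
  | none =>
    match b with
    | some r => some r
    | none =>
      match c with
      | some r => some r
      | none => d

def altLoop (name : String) (xs : List (List (String × Option String)))
    (e2 e3 e4 e5 : Option (List (String × Option String))) : Option (List (String × Option String)) :=
  match xs with
  | [] => pick4 e2 e3 e4 e5
  | s :: rest =>
    if dGet s "short_name" == some (some name) then some s
    else
      altLoop name rest
        (if e2 = none ∧ (dGet s "signature").join == some name then some s else e2)
        (if e3 = none ∧ lastSegment ((dGet s "short_name").join) == name then some s else e3)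
        (if e4 = none ∧ signatureName ((dGet s "signature").join) == name then some s else e4)
        (if e5 = none ∧ lastSegment (some (signatureName ((dGet s "signature").join))) == name then some s else e5)

def match_symbol_for_body_py_alt (raw_symbols : List (List (String × Option String))) (symbol_name : String) : Option (List (String × Option String)) :=
  altLoop symbol_name raw_symbols none none none none

-- ===== PRECONDITION & SPEC =====
-- Pre_ excludes exactly the inputs on which Python A raises KeyError: a dict without a
-- "short_name" key reached by the first scan before any exact short_name match.
def Pre_match_symbol_for_body_py (raw_symbols : List (List (String × Option String))) (symbol_name : String) : Prop :=
  ∀ i < raw_symbols.length,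
    (dGet raw_symbols[i]! "short_name").isSome = true ∨
    ((raw_symbols.take i).any (fun s => dGet s "short_name" == some (some symbol_name))) = true
instance (raw_symbols : List (List (String × Option String))) (symbol_name : String) : Decidable (Pre_match_symbol_for_body_py raw_symbols symbol_name) := by unfold Pre_match_symbol_for_body_py; infer_instance

def pvWitness_match_symbol_for_body_py : (List (List (String × Option String))) × String :=
  ([[("short_name", some "foo"), ("signature", some "foo(x)")]], "foo")

def Spec_match_symbol_for_body_py (raw_symbols : List (List (String × Option String))) (symbol_name : String) (out : Option (List (String × Option String))) : Prop := out = match_symbol_for_body_py_alt raw_symbols symbol_name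
instance (raw_symbols : List (List (String × Option String))) (symbol_name : String) (out : Option (List (String × Option String))) : Decidable (Spec_match_symbol_for_body_py raw_symbols symbol_name out) := by unfold Spec_match_symbol_for_body_py; infer_instance

-- ===== CLAIM (what is proved, stated in full; the proofs are below) =====
def Claim_equal_match_symbol_for_body_py : Prop := ∀ (raw_symbols : List (List (String × Option String))) (symbol_name : String), Dom_match_symbol_for_body_py raw_symbols symbol_name → Pre_match_symbol_for_body_py raw_symbols symbol_name → Spec_match_symbol_for_body_py raw_symbols symbol_name (match_symbol_for_body_py raw_symbols symbol_name)

-- ===== LEMMAS AND PROOFS =====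

-- main loop characterisation
theorem altLoop_eq (name : String) (xs : List (List (String × Option String)))
    (e2 e3 e4 e5 : Option (List (String × Option String))) :
    altLoop name xs e2 e3 e4 e5 =
      match xs.find? (fun s => dGet s "short_name" == some (some name)) with
      | some s => some s
      | none =>
        pick4 (e2.or (xs.find? (fun s => (dGet s "signature").join == some name)))
              (e3.or (xs.find? (fun s => lastSegment ((dGet s "short_name").join) == name)))
              (e4.or (xs.find? (fun s => signatureName ((dGet s "signature").join) == name)))
              (e5.or (xs.find? (fun s => lastSegment (some (signatureName ((dGet s "signature").join))) == name))) := by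
  induction xs generalizing e2 e3 e4 e5 with
  | nil => simp [altLoop, List.find?]
  | cons s rest ih =>
    have upd : ∀ (p : List (String × Option String) → Bool)
        (e : Option (List (String × Option String))),
        ((if e = none ∧ p s then some s else e).or (rest.find? p)) =
          (e.or ((s :: rest).find? p)) := by
      intro p e
      cases e with
      | some t => simp
      | none =>
        by_cases hp : p s
        · simp [hp, List.find?_cons_of_pos hp]
        · simp [hp, List.find?_cons_of_neg hp]
    by_cases h1 : (dGet s "short_name" == some (some name)) = true
    · simp [altLoop, h1, List.find?_cons_of_pos (p := fun s => dGet s "short_name" == some (some name)) h1]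
    · rw [altLoop]
      simp only [h1, Bool.false_eq_true, if_false, ih,
        List.find?_cons_of_neg (p := fun s => dGet s "short_name" == some (some name)) h1,
        upd (fun s => (dGet s "signature").join == some name),
        upd (fun s => lastSegment ((dGet s "short_name").join) == name),
        upd (fun s => signatureName ((dGet s "signature").join) == name),
        upd (fun s => lastSegment (some (signatureName ((dGet s "signature").join))) == name)]

theorem ports_agree (raw_symbols : List (List (String × Option String))) (symbol_name : String) :
    match_symbol_for_body_py raw_symbols symbol_name =
      match_symbol_for_body_py_alt raw_symbols symbol_name := by
  rw [match_symbol_for_body_py_alt, altLoop_eq]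
  rw [match_symbol_for_body_py]
  cases raw_symbols.find? (fun s => dGet s "short_name" == some (some symbol_name)) with
  | some t => rfl
  | none =>
    simp only [Option.none_or]
    cases raw_symbols.find? (fun s => (dGet s "signature").join == some symbol_name) with
    | some t => rfl
    | none =>
      cases raw_symbols.find? (fun s => lastSegment ((dGet s "short_name").join) == symbol_name) with
      | some t => rfl
      | none =>
        cases raw_symbols.find? (fun s => signatureName ((dGet s "signature").join) == symbol_name) with
        | some t => rfl
        | none => rfl

-- ===== VERDICT (by name: the statement is the Claim_ definition above) =====
theorem match_symbol_for_body_py_spec : Claim_equal_match_symbol_for_body_py := by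
  intro raw name _ _
  exact ports_agree raw name
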